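-- pv_equiv track=rewrite | github.com/ShubhamKaudewar/DSA_Practice | Leetcode/1639. Number of Ways to Form a Target String Given a Dictionary.py | numWays2
-- ===== SOURCE A (Python) =====
-- from typing import List
--
-- def numWays2(words: List[str], target: str) -> int:
--     MOD = 10 ** 9 + 7
--     m, n = len(words[0]), len(target)
--
--     # Precompute the frequency of each character at each position
--     freq = [[0] * 26 for _ in range(m)]
--     for word in words:
--         for i, char in enumerate(word):
--             freq[i][ord(char) - ord('a')] += 1
--
--     # Initialize dp array
--     dp = [0] * (n + 1)
--     dp[0] = 1  # Base case: 1 way to form an empty target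
--
--     # Fill the dp array
--     for i in range(m):
--         # Update dp in reverse to avoid overwriting
--         for j in range(n, 0, -1):
--             char_idx = ord(target[j - 1]) - ord('a')
--             dp[j] += dp[j - 1] * freq[i][char_idx]
--             dp[j] %= MOD
--
--     return dp[n]
-- ===== SOURCE B (Python) =====
-- from typing import List
-- from functools import lru_cache
--
-- def numWays2(words: List[str], target: str) -> int:
--     MOD = 10 ** 9 + 7
--     m, n = len(words[0]), len(target)
--
--     # Precompute the frequency of each character at each position (same as A)
--     freq = [[0] * 26 for _ in range(m)]
--     for word in words:
--         for i, char in enumerate(word):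
--             freq[i][ord(char) - ord('a')] += 1
--
--     # Top-down memoized recursion: rec(i, j) = number of ways (mod MOD) to form
--     # target[:j] using word columns 0..i-1.
--     @lru_cache(maxsize=None)
--     def rec(i: int, j: int) -> int:
--         if j == 0:
--             return 1
--         if i == 0:
--             return 0
--         return (rec(i - 1, j) + freq[i - 1][ord(target[j - 1]) - ord('a')] * rec(i - 1, j - 1)) % MOD
--
--     return rec(m, n)
-- ===== Notes on version B (the rewrite author's own statement) =====
-- stated objective: alternative
-- what changed: The in-place bottom-up 1D dp array with a reverse inner loop is replaced by a top-down memoized recursion rec(i, j) over (columns used, target prefix length), evaluated as rec(m, n).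
import Mathlib
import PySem

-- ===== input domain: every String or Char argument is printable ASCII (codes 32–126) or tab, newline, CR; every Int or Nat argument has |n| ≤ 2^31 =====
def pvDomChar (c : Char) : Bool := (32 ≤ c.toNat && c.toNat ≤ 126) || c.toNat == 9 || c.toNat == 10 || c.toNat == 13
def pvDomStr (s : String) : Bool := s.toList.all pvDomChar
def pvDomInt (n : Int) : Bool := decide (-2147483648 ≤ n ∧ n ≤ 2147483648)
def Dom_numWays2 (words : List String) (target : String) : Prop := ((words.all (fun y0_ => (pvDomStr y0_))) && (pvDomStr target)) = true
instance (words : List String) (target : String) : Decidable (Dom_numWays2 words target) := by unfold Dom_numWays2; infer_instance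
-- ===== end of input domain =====

-- B replaces A's in-place bottom-up 1D dp array (reverse inner loop) by a top-down
-- memoized recursion rec(i, j) = ways to form target[:j] from columns 0..i-1; same cost.

-- ===== PORT A =====
-- shared by both ports: both Pythons compute the same `freq` table by the same lines.
def pvCidx (c : Char) : Int := (c.toNat : Int) - 97

-- freq[i][idx] += 1 with Python list-index semantics (pySetD/pyGetD: negative idx wraps;
-- an out-of-range index is an IndexError in Python, excluded by Pre_).
def pvFreqBump (fr : List (List Int)) (i : Int) (idx : Int) : List (List Int) :=
  let row := PySem.List.pyGetD fr i []
  PySem.List.pySetD fr i (PySem.List.pySetD row idx (PySem.List.pyGetD row idx 0 + 1))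

def pvBuildFreq (words : List String) (m : Nat) : List (List Int) :=
  words.foldl
    (fun fr w => (PySem.List.enumerate w.toList).foldl (fun fr p => pvFreqBump fr p.1 (pvCidx p.2)) fr)
    (List.replicate m (List.replicate 26 0))

-- freq[i][ord(target[j-1]) - ord('a')]  (pyGetD is exact under Pre_: the index is in Python range)
def pvFA (freq : List (List Int)) (tgt : List Char) (i : Nat) : Int → Int :=
  fun j => PySem.List.pyGetD (freq.getD i []) (pvCidx (PySem.List.pyGetD tgt (j - 1) ' ')) 0

-- the two statements 'dp[j] += dp[j-1] * freq[i][char_idx]; dp[j] %= MOD'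
def pvStepA (MOD : Int) (f : Int → Int) (dp : List Int) (j : Int) : List Int :=
  let dp := PySem.List.pySetD dp j (PySem.List.pyGetD dp j 0 + PySem.List.pyGetD dp (j - 1) 0 * f j)
  PySem.List.pySetD dp j (PySem.List.pyGetD dp j 0 % MOD)

-- 'for j in range(n, 0, -1): …'
def pvColA (MOD : Int) (n : Nat) (f : Int → Int) (dp : List Int) : List Int :=
  (PySem.List.pyRange (n : Int) 0 (-1)).foldl (pvStepA MOD f) dp

-- dp = [0] * (n + 1); dp[0] = 1
def pvDP0 (n : Nat) : List Int := (List.replicate (n + 1) (0 : Int)).set 0 1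

def numWays2 (words : List String) (target : String) : Int :=
  let MOD : Int := 1000000007
  let m := (words.headD "").length          -- len(words[0]); words ≠ [] under Pre_
  let n := target.length
  let freq := pvBuildFreq words m
  let dp := (List.range m).foldl (fun dp i => pvColA MOD n (pvFA freq target.toList i) dp) (pvDP0 n)
  PySem.List.pyGetD dp (n : Int) 0

-- ===== PORT B =====
-- rec(i, j): ways (mod MOD) to form target[:j] using columns 0..i-1 (lru_cache only speeds
-- up the Python; the recursion itself is ported).  target[j-1] / freq[i-1] indices are the
-- matched naturals, always in list range when reached, so List.getD is exact there.
def pvRec (freq : List (List Int)) (tgt : List Char) (i j : Nat) : Int :=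
  match i, j with
  | _, 0 => 1
  | 0, _ + 1 => 0
  | i + 1, j + 1 =>
      (pvRec freq tgt i (j + 1)
        + PySem.List.pyGetD (freq.getD i []) (pvCidx (tgt.getD j ' ')) 0 * pvRec freq tgt i j)
        % 1000000007
termination_by i

def numWays2_alt (words : List String) (target : String) : Int :=
  let m := (words.headD "").length
  let freq := pvBuildFreq words m
  pvRec freq target.toList m target.length

-- ===== PRECONDITION & SPEC =====
-- Pre_ = exactly the inputs where Python A returns (no IndexError): words nonempty, no word
-- longer than words[0] (freq has len(words[0]) rows), and every character indexed into a
-- 26-list has code 71..122 (ord(c)-97 ∈ [-26,25], a valid Python index); target characters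
-- are only touched when len(words[0]) > 0.
def Pre_numWays2 (words : List String) (target : String) : Prop :=
  words ≠ [] ∧
  words.all (fun w => decide (w.length ≤ (words.headD "").length)
      && w.toList.all (fun c => 71 ≤ c.toNat && c.toNat ≤ 122)) = true ∧
  ((words.headD "").length ≠ 0 →
    target.toList.all (fun c => 71 ≤ c.toNat && c.toNat ≤ 122) = true)
instance (words : List String) (target : String) : Decidable (Pre_numWays2 words target) := by
  unfold Pre_numWays2; infer_instance

def pvWitness_numWays2 : List String × String := (["ab", "ba"], "ab")

def Spec_numWays2 (words : List String) (target : String) (out : Int) : Prop := out = numWays2_alt words target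
instance (words : List String) (target : String) (out : Int) : Decidable (Spec_numWays2 words target out) := by unfold Spec_numWays2; infer_instance

-- ===== CLAIM (what is proved, stated in full; the proofs are below) =====
def Claim_equal_numWays2 : Prop := ∀ (words : List String) (target : String), Dom_numWays2 words target → Pre_numWays2 words target → Spec_numWays2 words target (numWays2 words target)

-- ===== LEMMAS AND PROOFS =====

theorem pv_getD_set_self (l : List Int) (i : Nat) (v d : Int) (h : i < l.length) :
    (l.set i v).getD i d = v := by
  simp [List.getD, h]

theorem pv_getD_set_ne (l : List Int) (i j : Nat) (v d : Int) (h : i ≠ j) :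
    (l.set i v).getD j d = l.getD j d := by
  simp [List.getD, List.getElem?_set_ne h]

theorem pvStepA_length (MOD : Int) (f : Int → Int) (dp : List Int) (j : Int) :
    (pvStepA MOD f dp j).length = dp.length := by
  simp [pvStepA, PySem.List.length_pySetD]

theorem pvColA_length (MOD : Int) (n : Nat) (f : Int → Int) (dp : List Int) :
    (pvColA MOD n f dp).length = dp.length := by
  unfold pvColA
  generalize PySem.List.pyRange (n : Int) 0 (-1) = l
  induction l generalizing dp with
  | nil => rfl
  | cons x xs ih => rw [List.foldl_cons, ih, pvStepA_length]

-- one column pass: the reverse in-place loop over j = k..1 updates positions 1..k pointwise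
theorem pvFold_getD (MOD : Int) (f : Int → Int) :
    ∀ (k : Nat) (dp : List Int), k < dp.length →
      ∀ jq : Nat, jq < dp.length →
        ((PySem.List.pyRange (k : Int) 0 (-1)).foldl (pvStepA MOD f) dp).getD jq 0 =
          if 1 ≤ jq ∧ jq ≤ k then (dp.getD jq 0 + dp.getD (jq - 1) 0 * f (jq : Int)) % MOD
          else dp.getD jq 0 := by
  intro k
  induction k with
  | zero =>
      intro dp _ jq _
      rw [PySem.List.pyRange_neg_one_eq_nil (by norm_num), List.foldl_nil, if_neg (by omega)]
  | succ k ih =>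
      intro dp hk jq hjq
      rw [PySem.List.pyRange_neg_one_cons (by exact_mod_cast Nat.succ_pos k)]
      have hc : ((k + 1 : Nat) : Int) - 1 = (k : Int) := by push_cast; ring
      rw [List.foldl_cons, hc]
      have hstep : pvStepA MOD f dp ((k + 1 : Nat) : Int) =
          dp.set (k + 1) ((dp.getD (k + 1) 0 + dp.getD k 0 * f ((k + 1 : Nat) : Int)) % MOD) := by
        simp only [pvStepA]
        rw [hc]
        rw [PySem.List.pyGetD_natCast, PySem.List.pyGetD_natCast, PySem.List.pySetD_natCast,
          PySem.List.pyGetD_natCast, PySem.List.pySetD_natCast]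
        rw [pv_getD_set_self _ _ _ _ hk, List.set_set]
      rw [hstep]
      have hlen : k < (dp.set (k + 1) ((dp.getD (k + 1) 0 + dp.getD k 0 * f ((k + 1 : Nat) : Int)) % MOD)).length := by
        rw [List.length_set]; omega
      rw [ih _ hlen jq (by rw [List.length_set]; omega)]
      by_cases h1 : 1 ≤ jq ∧ jq ≤ k
      · rw [if_pos h1, if_pos ⟨h1.1, by omega⟩,
          pv_getD_set_ne _ _ _ _ _ (by omega), pv_getD_set_ne _ _ _ _ _ (by omega)]
      · rw [if_neg h1]
        by_cases h2 : jq = k + 1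
        · subst h2
          rw [if_pos ⟨by omega, le_refl _⟩, pv_getD_set_self _ _ _ _ hk, Nat.add_sub_cancel]
        · rw [if_neg (by omega), pv_getD_set_ne _ _ _ _ _ (by omega)]

theorem pvRec_zero (freq : List (List Int)) (tgt : List Char) (i : Nat) :
    pvRec freq tgt i 0 = 1 := by
  cases i <;> rw [pvRec]

theorem pvColA_getD (MOD : Int) (n : Nat) (f : Int → Int) (dp : List Int)
    (hn : n < dp.length) (jq : Nat) (hjq : jq < dp.length) :
    (pvColA MOD n f dp).getD jq 0 =
      if 1 ≤ jq ∧ jq ≤ n then (dp.getD jq 0 + dp.getD (jq - 1) 0 * f (jq : Int)) % MOD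
      else dp.getD jq 0 := by
  unfold pvColA
  exact pvFold_getD MOD f n dp hn jq hjq

theorem pvOuter_length (freq : List (List Int)) (tgt : List Char) (n : Nat) (m : Nat) :
    ((List.range m).foldl (fun dp i => pvColA 1000000007 n (pvFA freq tgt i) dp) (pvDP0 n)).length
      = n + 1 := by
  induction m with
  | zero => simp [pvDP0]
  | succ m ih =>
      rw [List.range_succ, List.foldl_append, List.foldl_cons, List.foldl_nil]
      rw [pvColA_length, ih]

-- the dp array after i columns holds rec(i, ·) at every position
theorem pvOuter_getD (freq : List (List Int)) (tgt : List Char) (n : Nat) :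
    ∀ (m : Nat) (jq : Nat), jq ≤ n →
      ((List.range m).foldl (fun dp i => pvColA 1000000007 n (pvFA freq tgt i) dp) (pvDP0 n)).getD jq 0
        = pvRec freq tgt m jq := by
  intro m
  induction m with
  | zero =>
      intro jq hjq
      rw [List.range_zero, List.foldl_nil]
      match jq with
      | 0 =>
          unfold pvDP0
          rw [pv_getD_set_self _ _ _ _ (by simp), pvRec_zero]
      | t + 1 =>
          unfold pvDP0
          rw [pv_getD_set_ne _ _ _ _ _ (by omega)]
          rw [show pvRec freq tgt 0 (t + 1) = 0 from by rw [pvRec]]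
          have ht : t + 1 < n + 1 := by omega
          simp [List.getD, ht]
  | succ m ih =>
      intro jq hjq
      rw [List.range_succ, List.foldl_append, List.foldl_cons, List.foldl_nil]
      have hlen := pvOuter_length freq tgt n m
      rw [pvColA_getD 1000000007 n _ _ (by omega) jq (by omega)]
      match jq with
      | 0 =>
          rw [if_neg (by omega), ih 0 (by omega), pvRec_zero, pvRec_zero]
      | t + 1 =>
          rw [if_pos ⟨by omega, hjq⟩, ih (t + 1) hjq]
          rw [Nat.add_sub_cancel, ih t (by omega)]
          have hfa : pvFA freq tgt m ((t + 1 : Nat) : Int)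
              = PySem.List.pyGetD (freq.getD m []) (pvCidx (tgt.getD t ' ')) 0 := by
            unfold pvFA
            rw [show ((t + 1 : Nat) : Int) - 1 = ((t : Nat) : Int) from by push_cast; ring,
              PySem.List.pyGetD_natCast]
          rw [hfa, pvRec]
          ring_nf

-- ===== VERDICT (by name: the statement is the Claim_ definition above) =====
theorem numWays2_spec : Claim_equal_numWays2 := by
  intro words target _ _
  show numWays2 words target = numWays2_alt words target
  unfold numWays2 numWays2_alt
  rw [PySem.List.pyGetD_natCast]
  exact pvOuter_getD (pvBuildFreq words (words.headD "").length) target.toList target.length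
    (words.headD "").length target.length (le_refl _)
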